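-- pv_equiv track=rewrite | github.com/chihiro888/my-algorithm-history | 2023/boj/dynamic_programming/14501.py | get_all_pattern
-- ===== SOURCE A (Python) =====
-- import itertools
--
-- def get_all_pattern(arr):
--     lst = [x for x in range(1, len(arr))]
--     result = []
--     for r in range(1, len(lst) + 1):
--         subsets = itertools.combinations(lst, r)
--         result.extend(subsets)
--     result = [list(subset) for subset in result]
--     return result
-- ===== SOURCE B (Python) =====
-- def get_all_pattern(arr):
--     # incremental powerset doubling over the indices 1..len(arr)-1, then one sort
--     # by (size, lexicographic) to reproduce the grouped-by-size order
--     subsets = [[]]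
--     for x in range(1, len(arr)):
--         subsets = subsets + [s + [x] for s in subsets]
--     return sorted(subsets[1:], key=lambda s: [len(s)] + s)
-- ===== Notes on version B (the rewrite author's own statement) =====
-- stated objective: alternative
-- what changed: B replaces the r-loop over itertools.combinations by a single incremental powerset-doubling pass over the indices followed by one stable sort with key [len(s)] + s, which reproduces A's grouped-by-size lexicographic order.
import Mathlib
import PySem

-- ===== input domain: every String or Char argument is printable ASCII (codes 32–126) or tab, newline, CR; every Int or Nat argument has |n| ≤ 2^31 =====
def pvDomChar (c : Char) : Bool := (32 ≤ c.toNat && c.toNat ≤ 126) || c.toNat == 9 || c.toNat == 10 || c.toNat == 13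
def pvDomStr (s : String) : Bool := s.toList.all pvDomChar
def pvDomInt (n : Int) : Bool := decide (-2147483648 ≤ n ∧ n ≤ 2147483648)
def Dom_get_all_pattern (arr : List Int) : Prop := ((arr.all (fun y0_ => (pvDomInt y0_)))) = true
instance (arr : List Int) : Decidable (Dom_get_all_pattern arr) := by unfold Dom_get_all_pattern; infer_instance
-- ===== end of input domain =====

-- B replaces the r-loop over itertools.combinations by one powerset-doubling pass plus a
-- single sort with key [len(s)] + s; equivalent (same output, same order), not faster.

-- ===== PORT A =====
def get_all_pattern (arr : List Int) : List (List Int) :=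
  let lst : List Int := PySem.List.pyRange 1 (arr.length : Int) 1
  let result : List (List Int) :=
    (PySem.List.pyRange 1 ((lst.length : Int) + 1) 1).foldl
      (fun acc r => acc ++ PySem.List.combinations lst r.toNat) []
  result.map (fun subset => subset)

-- ===== PORT B =====
def get_all_pattern_alt (arr : List Int) : List (List Int) :=
  let subsets : List (List Int) :=
    (PySem.List.pyRange 1 (arr.length : Int) 1).foldl
      (fun subsets x => subsets ++ subsets.map (fun s => s ++ [x])) [[]]
  PySem.List.sorted (PySem.List.slice subsets (some 1) none)
    (fun s => ((s.length : Int)) :: s) false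

-- ===== PRECONDITION & SPEC =====
def Spec_get_all_pattern (arr : List Int) (out : List (List Int)) : Prop := out = get_all_pattern_alt arr
instance (arr : List Int) (out : List (List Int)) : Decidable (Spec_get_all_pattern arr out) := by unfold Spec_get_all_pattern; infer_instance

-- ===== CLAIM (what is proved, stated in full; the proofs are below) =====
def Claim_equal_get_all_pattern : Prop := ∀ (arr : List Int), Dom_get_all_pattern arr → Spec_get_all_pattern arr (get_all_pattern arr)

-- ===== LEMMAS AND PROOFS =====

/-- `range(1, n)` as a mapped `List.range`. -/
lemma pyRange_one_nat (n : Nat) :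
    PySem.List.pyRange 1 (n : Int) 1 = (List.range (n - 1)).map (fun k : Nat => (k : Int) + 1) := by
  match n with
  | 0 => decide
  | 1 => decide
  | (n + 2) =>
      unfold PySem.List.pyRange
      have h1 : (1 : Int) < ((n + 2 : Nat) : Int) := by push_cast; omega
      have h2 : ((((n + 2 : Nat) : Int) - 1 + 1 - 1) / 1).toNat = n + 1 := by push_cast; omega
      simp only [if_neg one_ne_zero, if_pos (by norm_num : (0:Int) < 1), if_pos h1, h2]
      have h3 : (n + 2) - 1 = n + 1 := rfl
      rw [h3]
      refine List.map_congr_left ?_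
      intro k _; ring

/-- `sorted` with the default list `LT`/decidability equals `sorted` with the
`LinearOrder (List Int)` instances (the `LT`s are definitionally equal). -/
lemma sorted_inst_eq (xs : List (List Int)) (key : List Int → List Int) :
    PySem.List.sorted xs key false
      = @PySem.List.sorted (List Int) (List Int) List.instLinearOrder.toLT
          (@LinearOrder.toDecidableLT _ List.instLinearOrder) xs key false := by
  show List.foldl (fun acc x => PySem.List.insertBy
        (fun (a b : List Int) => decide (key a < key b)) x acc) [] xs
    = List.foldl (fun acc x => PySem.List.insertBy
        (fun (a b : List Int) =>
          @decide (@LT.lt _ List.instLinearOrder.toLT (key a) (key b))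
            (@LinearOrder.toDecidableLT _ List.instLinearOrder _ _)) x acc) [] xs
  have hb : (fun (a b : List Int) => decide (key a < key b))
      = (fun (a b : List Int) =>
          @decide (@LT.lt _ List.instLinearOrder.toLT (key a) (key b))
            (@LinearOrder.toDecidableLT _ List.instLinearOrder _ _)) := by
    funext a b
    exact decide_eq_decide.2 Iff.rfl
  rw [hb]

/-- The doubling loop computes `sublists`. -/
lemma foldl_double_sublists (xs l : List Int) :
    xs.foldl (fun acc x => acc ++ acc.map (fun s => s ++ [x])) l.sublists = (l ++ xs).sublists := by
  induction xs generalizing l with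
  | nil => simp
  | cons x xs ih =>
      simp only [List.foldl_cons]
      rw [← List.sublists_concat, ih]
      simp

/-- `sublists` always starts with `[]`. -/
lemma sublists_eq_nil_cons (l : List Int) : ∃ ts, l.sublists = [] :: ts := by
  induction l using List.reverseRecOn with
  | nil => exact ⟨[], by simp⟩
  | append_singleton l a ih =>
      obtain ⟨ts, h⟩ := ih
      exact ⟨ts ++ (l.sublists.map (fun s => s ++ [a])), by rw [List.sublists_concat, h]; simp⟩

/-- combinations of a duplicate-free list are duplicate-free. -/
lemma nodup_combinations (xs : List Int) (r : Nat) (h : xs.Nodup) :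
    (PySem.List.combinations xs r).Nodup := by
  induction xs generalizing r with
  | nil => cases r <;> simp [PySem.List.combinations_zero, PySem.List.combinations_nil_succ]
  | cons x xs ih =>
      cases r with
      | zero => simp [PySem.List.combinations_zero]
      | succ r =>
          rw [PySem.List.combinations_cons_succ]
          have hx : x ∉ xs := by simp [List.nodup_cons] at h; exact h.1
          have hxs : xs.Nodup := by simp [List.nodup_cons] at h; exact h.2
          refine List.Nodup.append ?_ (ih _ hxs) ?_
          · exact (ih r hxs).map (fun a b hab => by injection hab)
          · intro y hy hy'
            obtain ⟨c, _, rfl⟩ := List.mem_map.1 hy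
            have := (PySem.List.mem_combinations_iff _ _ _).1 hy'
            exact hx (this.1.subset (by simp))

/-- combinations of a strictly increasing list are strictly lex-increasing. -/
lemma pairwise_lt_combinations (xs : List Int) (r : Nat) (h : xs.Pairwise (· < ·)) :
    (PySem.List.combinations xs r).Pairwise (· < ·) := by
  induction xs generalizing r with
  | nil => cases r <;> simp [PySem.List.combinations_zero, PySem.List.combinations_nil_succ]
  | cons x xs ih =>
      cases r with
      | zero => simp [PySem.List.combinations_zero]
      | succ r =>
          rw [PySem.List.combinations_cons_succ]
          have hxall : ∀ y ∈ xs, x < y := (List.pairwise_cons.1 h).1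
          have hxs : xs.Pairwise (· < ·) := (List.pairwise_cons.1 h).2
          refine List.pairwise_append.2 ⟨?_, ih _ hxs, ?_⟩
          · refine (List.pairwise_map).2 ?_
            exact (ih r hxs).imp (fun hcd => (List.cons_lt_cons_iff).2 (Or.inr ⟨rfl, hcd⟩))
          · intro a ha b hb
            obtain ⟨c, _, rfl⟩ := List.mem_map.1 ha
            have hbm := (PySem.List.mem_combinations_iff _ _ _).1 hb
            cases b with
            | nil => simp at hbm
            | cons y d =>
                have hy : x < y := hxall y (hbm.1.subset (by simp))
                exact (List.cons_lt_cons_iff).2 (Or.inl hy)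

/-- Main structural theorem over an arbitrary strictly increasing index list. -/
lemma main_sorted (lst : List Int) (h : lst.Pairwise (· < ·)) :
    PySem.List.sorted (lst.sublists.drop 1) (fun s => ((s.length : Int)) :: s) false
      = (List.range lst.length).flatMap (fun k => PySem.List.combinations lst (k + 1)) := by
  have hnd : lst.Nodup := h.imp (fun hlt => ne_of_lt hlt)
  have hsnd : lst.sublists.Nodup := List.nodup_sublists.2 hnd
  obtain ⟨ts, hts⟩ := sublists_eq_nil_cons lst
  -- membership in the tail of sublists
  have hmem_tail : ∀ y : List Int, y ∈ lst.sublists.drop 1 ↔ y.Sublist lst ∧ y ≠ [] := by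
    intro y
    rw [hts]
    simp only [List.drop_succ_cons, List.drop_zero]
    constructor
    · intro hy
      have : y ∈ lst.sublists := by rw [hts]; exact List.mem_cons_of_mem _ hy
      refine ⟨List.mem_sublists.1 this, ?_⟩
      rintro rfl
      have : ([] : List Int) ∉ ts := by
        have := hts ▸ hsnd
        exact (List.nodup_cons.1 this).1
      exact this hy
    · rintro ⟨hsub, hne⟩
      have : y ∈ lst.sublists := List.mem_sublists.2 hsub
      rw [hts] at this
      rcases List.mem_cons.1 this with h' | hy
      · exact absurd h' hne
      · exact hy
  have hnd_tail : (lst.sublists.drop 1).Nodup := hsnd.sublist (List.drop_sublist _ _)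
  -- the flatMap side
  set R : List (List Int) :=
    (List.range lst.length).flatMap (fun k => PySem.List.combinations lst (k + 1)) with hR
  have hmem_R : ∀ y : List Int, y ∈ R ↔ y.Sublist lst ∧ y ≠ [] := by
    intro y
    rw [hR]
    simp only [List.mem_flatMap, List.mem_range, PySem.List.mem_combinations_iff]
    constructor
    · rintro ⟨k, _, hsub, hlen⟩
      exact ⟨hsub, by intro hy; rw [hy] at hlen; simp at hlen⟩
    · rintro ⟨hsub, hne⟩
      have hpos : 0 < y.length := List.length_pos_iff.2 hne
      refine ⟨y.length - 1, ?_, hsub, by omega⟩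
      have := hsub.length_le
      omega
  have hnd_R : R.Nodup := by
    rw [hR, List.nodup_flatMap]
    refine ⟨fun k _ => nodup_combinations lst (k + 1) hnd, ?_⟩
    refine (List.pairwise_lt_range).imp ?_
    intro k1 k2 hk y hy1 hy2
    have h1 := (PySem.List.mem_combinations_iff _ _ _).1 hy1
    have h2 := (PySem.List.mem_combinations_iff _ _ _).1 hy2
    omega
  have hperm : R.Perm (lst.sublists.drop 1) := by
    rw [List.perm_ext_iff_of_nodup hnd_R hnd_tail]
    intro y; rw [hmem_R, hmem_tail]
  have hpw : R.Pairwise (fun a b => (((a.length : Int)) :: a) < (((b.length : Int)) :: b)) := by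
    rw [hR, List.pairwise_flatMap]
    constructor
    · intro k _
      refine List.Pairwise.imp_of_mem ?_ (pairwise_lt_combinations lst (k + 1) h)
      intro a b ha hb hab
      have h1 := (PySem.List.mem_combinations_iff _ _ _).1 ha
      have h2 := (PySem.List.mem_combinations_iff _ _ _).1 hb
      refine (List.cons_lt_cons_iff).2 (Or.inr ⟨?_, hab⟩)
      rw [h1.2, h2.2]
    · refine (List.pairwise_lt_range).imp ?_
      intro k1 k2 hk a ha b hb
      have h1 := (PySem.List.mem_combinations_iff _ _ _).1 ha
      have h2 := (PySem.List.mem_combinations_iff _ _ _).1 hb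
      refine (List.cons_lt_cons_iff).2 (Or.inl ?_)
      rw [h1.2, h2.2]; exact_mod_cast by omega
  rw [sorted_inst_eq]
  exact PySem.List.sorted_eq_of_perm_of_pairwise_lt _ _ _ hperm hpw

/-- Both ports' index list is strictly increasing. -/
lemma pairwise_lt_map_range (n : Nat) :
    ((List.range n).map (fun k : Nat => (k : Int) + 1)).Pairwise (· < ·) := by
  refine (List.pairwise_map).2 ?_
  refine (List.pairwise_lt_range).imp ?_
  intro a b hk
  omega

-- ===== VERDICT (by name: the statement is the Claim_ definition above) =====
theorem get_all_pattern_spec : Claim_equal_get_all_pattern := by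
  intro arr _
  unfold Spec_get_all_pattern get_all_pattern get_all_pattern_alt
  set lst : List Int := PySem.List.pyRange 1 (arr.length : Int) 1 with hlst
  show (List.map (fun subset => subset)
      (List.foldl (fun acc r => acc ++ PySem.List.combinations lst r.toNat) []
        (PySem.List.pyRange 1 ((lst.length : Int) + 1) 1)))
    = PySem.List.sorted (PySem.List.slice
        (List.foldl (fun subsets x => subsets ++ List.map (fun s => s ++ [x]) subsets) [[]] lst)
        (some 1) none) (fun s => ((s.length : Int)) :: s) false
  have hlst' : lst = (List.range (arr.length - 1)).map (fun k : Nat => (k : Int) + 1) :=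
    pyRange_one_nat arr.length
  have hlen : lst.length = arr.length - 1 := by rw [hlst']; simp
  -- A's side
  rw [PySem.List.foldl_append_eq_flatMap]
  have hA : PySem.List.pyRange 1 ((lst.length : Int) + 1) 1
      = (List.range lst.length).map (fun k : Nat => (k : Int) + 1) := by
    have := pyRange_one_nat (lst.length + 1)
    simpa using this
  rw [hA, List.flatMap_map]
  have htoNat : ∀ k : Nat, ((k : Int) + 1).toNat = k + 1 := by intro k; omega
  simp only [htoNat, List.nil_append, List.map_id_fun']
  -- B's side
  have hB : lst.foldl (fun subsets x => subsets ++ subsets.map (fun s => s ++ [x])) [[]]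
      = lst.sublists := by
    have := foldl_double_sublists lst []
    simpa using this
  rw [hB, PySem.List.slice_from _ (by norm_num)]
  have hmain := main_sorted lst (hlst' ▸ pairwise_lt_map_range (arr.length - 1))
  simp only [Int.toNat_one] at hmain ⊢
  rw [hmain]
  rfl
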